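-- pv_equiv track=rewrite | github.com/mkierc/calculate-it-solver | calculator_engine.py | prepare_instruction_list
-- ===== SOURCE A (Python) =====
-- def prepare_instruction_list(instruction_list):
--     # concatenate consecutive numbers
--     result = []
--     num = ''
--
--     for char in instruction_list:
--         if char.isdigit():
--             num += char
--         else:
--             if num:
--                 result.append(num)
--                 num = ''
--             result.append(char)
--
--     if num:
--         result.append(num)
--
--     return result
-- ===== SOURCE B (Python) =====
-- from itertools import groupby
--
-- def prepare_instruction_list(instruction_list):
--     result = []
--     for is_digit, group in groupby(instruction_list, key=lambda c: c.isdigit()):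
--         if is_digit:
--             result.append(''.join(group))
--         else:
--             result.extend(group)
--     return result
-- ===== Notes on version B (the rewrite author's own statement) =====
-- stated objective: idiomatic
-- what changed: Replaces the hand-maintained pending-number accumulator and flush logic with itertools.groupby over the isdigit classification: digit runs are joined into one token, non-digit runs are extended character by character.
import Mathlib
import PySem

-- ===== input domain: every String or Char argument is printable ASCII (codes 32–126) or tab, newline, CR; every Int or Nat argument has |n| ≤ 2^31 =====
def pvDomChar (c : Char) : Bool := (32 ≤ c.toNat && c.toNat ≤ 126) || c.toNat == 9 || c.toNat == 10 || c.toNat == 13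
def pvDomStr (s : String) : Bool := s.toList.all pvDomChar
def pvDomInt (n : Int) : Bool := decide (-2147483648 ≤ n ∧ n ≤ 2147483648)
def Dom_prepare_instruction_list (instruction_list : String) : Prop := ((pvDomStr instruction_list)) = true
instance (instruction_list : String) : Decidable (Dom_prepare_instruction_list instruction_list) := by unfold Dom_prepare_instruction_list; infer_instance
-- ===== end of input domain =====

-- B replaces A's pending-number accumulator with a groupby over the isdigit classification (idiomatic; same cost).

-- ===== PORT A =====
-- A's for-loop over the characters, carrying (result, num) exactly as the Python does;
-- single characters are appended as one-char strings, num is flushed at the end if nonempty.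
def pvLoopA : List Char → List String → List Char → List String
  | [], result, num => if num = [] then result else result ++ [String.mk num]
  | c :: cs, result, num =>
      if PySem.Chars.isdigit c then
        pvLoopA cs result (num ++ [c])
      else
        pvLoopA cs ((if num = [] then result else result ++ [String.mk num]) ++ [String.mk [c]]) []

def prepare_instruction_list (instruction_list : String) : List String :=
  pvLoopA instruction_list.toList [] []

-- ===== PORT B =====
-- Source B's groupby: peel off one maximal run at a time; digit runs become one joined token,
-- non-digit runs are emitted character by character.
def pvRunsB : List Char → List String
  | [] => []
  | c :: cs =>
      if PySem.Chars.isdigit c then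
        String.mk ((c :: cs).takeWhile PySem.Chars.isdigit)
          :: pvRunsB ((c :: cs).dropWhile PySem.Chars.isdigit)
      else
        String.mk [c] :: pvRunsB cs
  termination_by l => l.length
  decreasing_by
    · simp only [List.dropWhile, *, if_pos]
      exact Nat.lt_succ_of_le (List.length_dropWhile_le _ _)
    · simp

def prepare_instruction_list_alt (instruction_list : String) : List String :=
  pvRunsB instruction_list.toList

-- ===== PRECONDITION & SPEC =====
def Spec_prepare_instruction_list (instruction_list : String) (out : List String) : Prop := out = prepare_instruction_list_alt instruction_list
instance (instruction_list : String) (out : List String) : Decidable (Spec_prepare_instruction_list instruction_list out) := by unfold Spec_prepare_instruction_list; infer_instance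

-- ===== CLAIM (what is proved, stated in full; the proofs are below) =====
def Claim_equal_prepare_instruction_list : Prop := ∀ (instruction_list : String), Dom_prepare_instruction_list instruction_list → Spec_prepare_instruction_list instruction_list (prepare_instruction_list instruction_list)

-- ===== LEMMAS AND PROOFS =====

-- the accumulated result factors out of A's loop
theorem pvLoopA_append (cs : List Char) : ∀ (res : List String) (num : List Char),
    pvLoopA cs res num = res ++ pvLoopA cs [] num := by
  induction cs with
  | nil => intro res num; simp [pvLoopA]; split <;> simp
  | cons c cs ih =>
      intro res num
      simp only [pvLoopA]
      split
      · exact ih res (num ++ [c])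
      · by_cases hn : num = []
        · simp only [hn, if_pos, List.nil_append]
          rw [ih (res ++ [String.mk [c]]) [], ih [String.mk [c]] []]
          simp
        · simp only [if_neg hn, List.nil_append]
          rw [ih (res ++ [String.mk num] ++ [String.mk [c]]) [],
              ih ([String.mk num] ++ [String.mk [c]]) []]
          simp

-- A's loop from an empty result equals B's run decomposition; the second conjunct tracks a
-- pending nonempty digit prefix `num`.
theorem pvLoopA_eq_runsB (cs : List Char) :
    pvLoopA cs [] [] = pvRunsB cs ∧
    ∀ num : List Char, num ≠ [] →
      pvLoopA cs [] num =
        String.mk (num ++ cs.takeWhile PySem.Chars.isdigit)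
          :: pvRunsB (cs.dropWhile PySem.Chars.isdigit) := by
  induction cs with
  | nil =>
      constructor
      · simp [pvLoopA, pvRunsB]
      · intro num h; simp [pvLoopA, pvRunsB, h]
  | cons c cs ih =>
      by_cases hd : PySem.Chars.isdigit c
      · constructor
        · rw [show pvLoopA (c :: cs) [] [] = pvLoopA cs [] [c] by simp [pvLoopA, hd],
              ih.2 [c] (by simp), pvRunsB]
          simp [hd, List.takeWhile, List.dropWhile]
        · intro num h
          rw [show pvLoopA (c :: cs) [] num = pvLoopA cs [] (num ++ [c]) by simp [pvLoopA, hd],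
              ih.2 (num ++ [c]) (by simp)]
          simp [hd, List.takeWhile, List.dropWhile]
      · have step : ∀ num : List Char, pvLoopA (c :: cs) [] num =
            (if num = [] then [] else [String.mk num]) ++ [String.mk [c]] ++ pvRunsB cs := by
          intro num
          simp only [pvLoopA, hd, Bool.false_eq_true, if_false]
          rw [pvLoopA_append, ih.1]
          split <;> simp
        constructor
        · rw [step []]; simp [pvRunsB, hd]
        · intro num h
          rw [step num]
          simp [pvRunsB, hd, h, List.takeWhile, List.dropWhile]

-- ===== VERDICT (by name: the statement is the Claim_ definition above) =====
theorem prepare_instruction_list_spec : Claim_equal_prepare_instruction_list := by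
  intro s _
  unfold Spec_prepare_instruction_list prepare_instruction_list prepare_instruction_list_alt
  exact (pvLoopA_eq_runsB s.toList).1
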